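-- pv_equiv track=rewrite | github.com/davidsonuzowuru/bts-bdp-assignment | bdi_api/s4/exercise.py | generate_file_urls
-- ===== SOURCE A (Python) =====
-- FILE_INTERVAL_SECONDS = 5
--
-- def generate_file_urls(base_url: str, file_limit: int, start_offset: int = 0) -> list[tuple[str, str]]:
--     """
--     Generate (filename, url) pairs for readsb-hist files.
--     Files are named HHMMSSZ.json.gz at 5-second intervals.
--     start_offset skips the first N files (used to resume interrupted downloads).
--     """
--     results = []
--     total_seconds = start_offset * FILE_INTERVAL_SECONDS
--     max_seconds = 24 * 3600
--
--     while len(results) < file_limit and total_seconds < max_seconds: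
--         hh = total_seconds // 3600
--         mm = (total_seconds % 3600) // 60
--         ss = total_seconds % 60
--         filename = f"{hh:02d}{mm:02d}{ss:02d}Z.json.gz"
--         url = base_url + filename
--         results.append((filename, url))
--         total_seconds += FILE_INTERVAL_SECONDS
--
--     return results
-- ===== SOURCE B (Python) =====
-- FILE_INTERVAL_SECONDS = 5
--
-- def generate_file_urls(base_url: str, file_limit: int, start_offset: int = 0) -> list[tuple[str, str]]:
--     # Different algorithm: precompute the whole day's filename table (triple loop over
--     # hours/minutes/seconds, no divmod per emitted file), then cut the requested window
--     # out of it. A negative start_offset ("skip N files") is clamped to 0.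
--     names = [f"{hh:02d}{mm:02d}{ss:02d}Z.json.gz"
--              for hh in range(24)
--              for mm in range(60)
--              for ss in range(0, 60, FILE_INTERVAL_SECONDS)]
--     lo = max(0, start_offset)
--     hi = min(len(names), lo + max(0, file_limit))
--     return [(fn, base_url + fn) for fn in names[lo:hi]]
-- ===== Notes on version B (the rewrite author's own statement) =====
-- stated objective: alternative
-- what changed: Instead of A's dual-guard while loop with a running seconds counter and per-step divmod, B precomputes the whole day's filename table with a triple nested loop over hours/minutes/seconds and then cuts the requested [start_offset, start_offset+file_limit) window out of that table.
-- intended difference: For start_offset < 0 with file_limit > 0, A emits nonsense filenames for negative times (e.g. '-15955Z.json.gz' — no such readsb-hist file exists, since start_offset counts files already downloaded), while B clamps the skip to 0 and returns the real files from 000000Z on, which is the intended resume behaviour. — e.g. on generate_file_urls("u/", 1, -1): A returns [("-15955Z.json.gz", "u/-15955Z.json.gz")], B returns [("000000Z.json.gz", "u/000000Z.json.gz")]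
import Mathlib
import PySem

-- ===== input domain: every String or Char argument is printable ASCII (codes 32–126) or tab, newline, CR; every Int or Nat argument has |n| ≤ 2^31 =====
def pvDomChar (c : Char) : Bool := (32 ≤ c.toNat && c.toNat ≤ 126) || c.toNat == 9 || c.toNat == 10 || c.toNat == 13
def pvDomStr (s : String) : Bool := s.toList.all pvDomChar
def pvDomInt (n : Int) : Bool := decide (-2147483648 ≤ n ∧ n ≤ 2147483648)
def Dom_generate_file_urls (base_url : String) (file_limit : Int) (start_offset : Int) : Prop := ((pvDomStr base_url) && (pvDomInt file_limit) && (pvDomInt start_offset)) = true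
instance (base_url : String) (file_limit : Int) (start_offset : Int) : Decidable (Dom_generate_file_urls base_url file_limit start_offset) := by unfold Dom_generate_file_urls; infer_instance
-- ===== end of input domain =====

-- B replaces A's dual-guard while loop (running seconds counter, divmod per step) by a precomputed
-- full-day filename table built from a triple hours/minutes/seconds loop, from which the requested
-- window is cut; on the degenerate inputs D_ (negative start_offset with positive limit) B clamps
-- the skip to 0 instead of emitting A's negative-time filenames (objective: alternative).


-- ===== PORT A =====
-- f"{x:02d}"  (exact: Python's 02d zero-pads after the sign, as zfill does)
def pvFmt02 (x : Int) : String := PySem.Str.zfill (PySem.Int.toStr x) 2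

-- the while loop: state (results, total_seconds); guard len(results) < file_limit and total_seconds < 86400
def pvALoop (base_url : String) (file_limit : Int) (results : List (String × String)) (total_seconds : Int) : List (String × String) :=
  if h : (results.length : Int) < file_limit ∧ total_seconds < 86400 then
    let hh := PySem.Int.floordiv total_seconds 3600
    let mm := PySem.Int.floordiv (PySem.Int.mod total_seconds 3600) 60
    let ss := PySem.Int.mod total_seconds 60
    let filename := pvFmt02 hh ++ pvFmt02 mm ++ pvFmt02 ss ++ "Z.json.gz"
    let url := base_url ++ filename
    pvALoop base_url file_limit (results ++ [(filename, url)]) (total_seconds + 5)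
  else results
termination_by (86400 - total_seconds).toNat
decreasing_by omega

def generate_file_urls (base_url : String) (file_limit : Int) (start_offset : Int) : List (String × String) :=
  pvALoop base_url file_limit [] (start_offset * 5)

-- ===== PORT B =====
-- the filename for a given (hh, mm, ss)
def pvNameB (hh mm ss : Int) : String := pvFmt02 hh ++ pvFmt02 mm ++ pvFmt02 ss ++ "Z.json.gz"

-- the day's table: [f"…" for hh in range(24) for mm in range(60) for ss in range(0, 60, 5)]
def pvNamesDay : List String :=
  (PySem.List.pyRange 0 24 1).flatMap (fun hh =>
    (PySem.List.pyRange 0 60 1).flatMap (fun mm =>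
      (PySem.List.pyRange 0 60 5).map (fun ss => pvNameB hh mm ss)))

def generate_file_urls_alt (base_url : String) (file_limit : Int) (start_offset : Int) : List (String × String) :=
  let names := pvNamesDay
  let lo := max 0 start_offset
  let hi := min (names.length : Int) (lo + max 0 file_limit)
  (PySem.List.slice names (some lo) (some hi)).map (fun fn => (fn, base_url ++ fn))

-- ===== PRECONDITION & SPEC =====
-- For start_offset < 0 with file_limit > 0, A emits nonsense filenames for negative times
-- (e.g. "-15955Z.json.gz" — no such readsb-hist file exists, since start_offset counts files
-- already downloaded), while B clamps the skip to 0 and returns the real files from 000000Z on,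
-- which is the intended resume behaviour.
def D_generate_file_urls (base_url : String) (file_limit : Int) (start_offset : Int) : Prop :=
  start_offset < 0 ∧ 0 < file_limit
instance (base_url : String) (file_limit : Int) (start_offset : Int) : Decidable (D_generate_file_urls base_url file_limit start_offset) := by unfold D_generate_file_urls; infer_instance

def Spec_generate_file_urls (base_url : String) (file_limit : Int) (start_offset : Int) (out : List (String × String)) : Prop := ¬ D_generate_file_urls base_url file_limit start_offset → out = generate_file_urls_alt base_url file_limit start_offset
instance (base_url : String) (file_limit : Int) (start_offset : Int) (out : List (String × String)) : Decidable (Spec_generate_file_urls base_url file_limit start_offset out) := by unfold Spec_generate_file_urls; infer_instance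

def pvDiffWitness_generate_file_urls : String × Int × Int := ("u/", 1, -1)
def pvDiffWitnessOut_generate_file_urls : (List (String × String)) × (List (String × String)) :=
  ([("-15955Z.json.gz", "u/-15955Z.json.gz")], [("000000Z.json.gz", "u/000000Z.json.gz")])

-- ===== CLAIM (what is proved, stated in full; the proofs are below) =====
def Claim_unchanged_generate_file_urls : Prop := ∀ (base_url : String) (file_limit : Int) (start_offset : Int), Dom_generate_file_urls base_url file_limit start_offset → Spec_generate_file_urls base_url file_limit start_offset (generate_file_urls base_url file_limit start_offset)
def Claim_changed_generate_file_urls : Prop := Dom_generate_file_urls (pvDiffWitness_generate_file_urls.1) (pvDiffWitness_generate_file_urls.2.1) (pvDiffWitness_generate_file_urls.2.2) ∧ D_generate_file_urls (pvDiffWitness_generate_file_urls.1) (pvDiffWitness_generate_file_urls.2.1) (pvDiffWitness_generate_file_urls.2.2) ∧ generate_file_urls (pvDiffWitness_generate_file_urls.1) (pvDiffWitness_generate_file_urls.2.1) (pvDiffWitness_generate_file_urls.2.2) = pvDiffWitnessOut_generate_file_urls.1 ∧ generate_file_urls_alt (pvDiffWitness_generate_file_urls.1) (pvDiffWitness_generate_file_urls.2.1)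 (pvDiffWitness_generate_file_urls.2.2) = pvDiffWitnessOut_generate_file_urls.2 ∧ pvDiffWitnessOut_generate_file_urls.1 ≠ pvDiffWitnessOut_generate_file_urls.2

-- ===== LEMMAS AND PROOFS =====
-- the filename A computes at loop index i (total_seconds = i * 5)
def pvAName (i : Int) : String :=
  let t := i * 5
  pvFmt02 (PySem.Int.floordiv t 3600) ++ pvFmt02 (PySem.Int.floordiv (PySem.Int.mod t 3600) 60)
    ++ pvFmt02 (PySem.Int.mod t 60) ++ "Z.json.gz"

theorem pvAName_def (i : Int) : pvAName i =
    pvFmt02 (PySem.Int.floordiv (i * 5) 3600) ++ pvFmt02 (PySem.Int.floordiv (PySem.Int.mod (i * 5) 3600) 60)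
      ++ pvFmt02 (PySem.Int.mod (i * 5) 60) ++ "Z.json.gz" := rfl

-- Loop characterisation: from state (res, 5*j), the loop appends exactly the pairs for
-- indices j, j+1, …, j+k-1 where k = max 0 (min (file_limit - res.length) (17280 - j)).
theorem pvALoop_eq (base_url : String) (file_limit : Int) (k : Nat) :
    ∀ (res : List (String × String)) (j : Int),
      max 0 (min (file_limit - res.length) (17280 - j)) = (k : Int) →
      pvALoop base_url file_limit res (j * 5) =
        res ++ (PySem.List.pyRange j (j + k) 1).map (fun i => (pvAName i, base_url ++ pvAName i)) := by
  induction k with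
  | zero =>
    intro res j hk
    rw [pvALoop]
    rw [dif_neg (by omega)]
    simp
  | succ k ih =>
    intro res j hk
    rw [pvALoop]
    rw [dif_pos (by push_cast at hk ⊢; omega)]
    have hrec : (res ++ [(pvAName j, base_url ++ pvAName j)]).length = res.length + 1 := by
      simp
    have hj5 : j * 5 + 5 = (j + 1) * 5 := by ring
    have hstep := ih (res ++ [(pvAName j, base_url ++ pvAName j)]) (j + 1)
      (by rw [hrec]; push_cast at hk ⊢; omega)
    simp only [← pvAName_def]
    rw [hj5, hstep]
    push_cast
    rw [show j + 1 + (k:Int) = j + ((k:Int) + 1) from by ring,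
        PySem.List.pyRange_one_cons (by omega : j < j + ((k:Int) + 1))]
    simp

-- index arithmetic: the table entry at index 720*h + 12*m + s is A's filename at that index
theorem pvAName_eq_nameB (h m s : Int) (hh : 0 ≤ h) (hm0 : 0 ≤ m) (hm : m < 60)
    (hs0 : 0 ≤ s) (hs : s < 12) :
    pvAName (720 * h + 12 * m + s) = pvNameB h m (5 * s) := by
  rw [pvAName_def, pvNameB]
  have e1 : PySem.Int.floordiv ((720 * h + 12 * m + s) * 5) 3600 = h := by
    rw [PySem.Int.floordiv_eq_ediv_of_pos (by omega)]; omega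
  have em : PySem.Int.mod ((720 * h + 12 * m + s) * 5) 3600 = 60 * m + 5 * s := by
    rw [PySem.Int.mod_eq_emod_of_pos (by omega)]; omega
  have e2 : PySem.Int.floordiv (60 * m + 5 * s) 60 = m := by
    rw [PySem.Int.floordiv_eq_ediv_of_pos (by omega)]; omega
  have e3 : PySem.Int.mod ((720 * h + 12 * m + s) * 5) 60 = 5 * s := by
    rw [PySem.Int.mod_eq_emod_of_pos (by omega)]; omega
  rw [e1, em, e2, e3]

-- shifting a unit range under a map
theorem map_pyRange_shift {α : Type} (c n : Int) (f : Int → α) :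
    (PySem.List.pyRange c (c + n) 1).map f = (PySem.List.pyRange 0 n 1).map (fun r => f (c + r)) := by
  rw [PySem.List.pyRange_one, PySem.List.pyRange_one, List.map_map, List.map_map]
  simp

-- glueing B-sized blocks: if g h is the f-image of the h-th block, the flatMap is one long map
theorem flatMap_blocks {α : Type} (B : Nat) (g : Int → List α) (f : Int → α) :
    ∀ H : Nat, (∀ h : Int, 0 ≤ h → h < H → g h = (PySem.List.pyRange ((B : Int) * h) ((B : Int) * h + B) 1).map f) →
      (PySem.List.pyRange 0 (H : Int) 1).flatMap g = (PySem.List.pyRange 0 ((B : Int) * H) 1).map f := by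
  intro H
  induction H with
  | zero => intro _; simp [PySem.List.pyRange_one_eq_nil]
  | succ H ih =>
    intro hg
    have h1 : ((H : Int) + 1) = ((H + 1 : Nat) : Int) := by push_cast; ring
    rw [show ((H + 1 : Nat) : Int) = (H : Int) + 1 from by push_cast; ring,
        PySem.List.pyRange_one_succ_right (by positivity), List.flatMap_append,
        ih (fun h h0 hH => hg h h0 (by push_cast at hH ⊢; omega))]
    rw [show ((B : Int) * ((H : Int) + 1)) = (B : Int) * H + B from by ring]
    rw [PySem.List.pyRange_one_append 0 ((B : Int) * H) ((B : Int) * H + B) (by positivity) (by omega),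
        List.map_append]
    simp only [List.flatMap_cons, List.flatMap_nil, List.append_nil]
    exact congrArg _ (hg H (by positivity) (by push_cast; omega))

-- the table is A's filename function mapped over indices 0 … 17279
theorem namesDay_eq : pvNamesDay = (PySem.List.pyRange 0 17280 1).map pvAName := by
  unfold pvNamesDay
  have hstep : PySem.List.pyRange 0 60 5 = (PySem.List.pyRange 0 12 1).map (fun s => 5 * s) := by decide
  have inner : ∀ h : Int, 0 ≤ h →
      (PySem.List.pyRange 0 60 1).flatMap (fun mm => (PySem.List.pyRange 0 60 5).map (fun ss => pvNameB h mm ss))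
        = (PySem.List.pyRange (720 * h) (720 * h + 720) 1).map pvAName := by
    intro h h0
    rw [map_pyRange_shift (720 * h) 720 pvAName]
    have hyp : ∀ m : Int, 0 ≤ m → m < ((60 : Nat) : Int) →
        (fun mm => (PySem.List.pyRange 0 60 5).map (fun ss => pvNameB h mm ss)) m
          = (PySem.List.pyRange (((12 : Nat) : Int) * m) (((12 : Nat) : Int) * m + (12 : Nat)) 1).map
              (fun r => pvAName (720 * h + r)) := by
      intro m m0 m60
      simp only []
      rw [hstep, List.map_map]
      rw [show (((12 : Nat) : Int) * m + ((12 : Nat) : Int)) = 12 * m + 12 from by push_cast; ring,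
          show (((12 : Nat) : Int) * m) = 12 * m from by push_cast; ring]
      rw [map_pyRange_shift (12 * m) 12]
      apply List.map_congr_left
      intro s hs
      rw [PySem.List.mem_pyRange_one] at hs
      have hb := pvAName_eq_nameB h m s h0 m0 (by push_cast at m60; omega) hs.1 hs.2
      simp only [Function.comp]
      rw [show (720 * h + (12 * m + s)) = (720 * h + 12 * m + s) from by ring, hb]
    have hb := flatMap_blocks 12
      (fun mm => (PySem.List.pyRange 0 60 5).map (fun ss => pvNameB h mm ss))
      (fun r => pvAName (720 * h + r)) 60 hyp
    push_cast at hb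
    exact hb
  have houter := flatMap_blocks 720
    (fun h => (PySem.List.pyRange 0 60 1).flatMap (fun mm => (PySem.List.pyRange 0 60 5).map (fun ss => pvNameB h mm ss)))
    pvAName 24
    (fun h h0 _ => (inner h h0).trans (by norm_num))
  rw [show (24 : Int) = ((24 : Nat) : Int) from rfl]
  rw [houter]
  norm_num

theorem namesDay_length : (pvNamesDay.length : Int) = 17280 := by
  rw [namesDay_eq, List.length_map, PySem.List.length_pyRange_one]
  decide

-- cutting a window out of pyRange 0 N
theorem drop_take_pyRange (N lo hi : Int) (h0 : 0 ≤ lo) (h1 : 0 ≤ hi) (h2 : hi ≤ N) :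
    ((PySem.List.pyRange 0 N 1).drop lo.toNat).take (hi.toNat - lo.toNat) = PySem.List.pyRange lo hi 1 := by
  apply List.ext_getElem
  · simp only [List.length_take, List.length_drop, PySem.List.length_pyRange_one]
    omega
  · intro k hk1 hk2
    simp only [List.getElem_take, List.getElem_drop, PySem.List.getElem_pyRange_one]
    simp only [List.length_take, List.length_drop, PySem.List.length_pyRange_one] at hk1
    omega

-- B characterised as a map over the window's index range
theorem alt_eq (base_url : String) (file_limit : Int) (start_offset : Int) :
    generate_file_urls_alt base_url file_limit start_offset =
      (PySem.List.pyRange (max 0 start_offset) (min 17280 (max 0 start_offset + max 0 file_limit)) 1).map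
        (fun i => (pvAName i, base_url ++ pvAName i)) := by
  unfold generate_file_urls_alt
  simp only [namesDay_length]
  have hlo : (0 : Int) ≤ max 0 start_offset := le_max_left _ _
  have hhi : (0 : Int) ≤ min 17280 (max 0 start_offset + max 0 file_limit) := by
    have : (0 : Int) ≤ max 0 file_limit := le_max_left _ _
    omega
  rw [PySem.List.slice_toNat _ hlo hhi, namesDay_eq]
  rw [← List.map_drop, ← List.map_take, drop_take_pyRange 17280 _ _ hlo hhi (by omega), List.map_map]
  rfl

-- ===== VERDICT (by name: the statement is the Claim_ definition above) =====
theorem generate_file_urls_spec : Claim_unchanged_generate_file_urls := by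
  intro base_url file_limit start_offset _ hD
  unfold generate_file_urls
  rw [alt_eq]
  unfold D_generate_file_urls at hD
  set n := max 0 (min file_limit (17280 - start_offset)) with hn
  have hn0 : 0 ≤ n := le_max_left _ _
  have hk : max 0 (min (file_limit - ([] : List (String × String)).length) (17280 - start_offset)) = ((n.toNat : Nat) : Int) := by
    simp only [List.length_nil, Int.toNat_of_nonneg hn0]
    omega
  rw [pvALoop_eq base_url file_limit n.toNat [] start_offset hk]
  rw [Int.toNat_of_nonneg hn0]
  simp only [List.nil_append]
  by_cases hcase : 0 ≤ start_offset ∧ start_offset ≤ 17280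
  · rw [show max 0 start_offset = start_offset from by omega,
        show min 17280 (start_offset + max 0 file_limit) = start_offset + n from by omega]
  · rw [PySem.List.pyRange_one_eq_nil (by omega), PySem.List.pyRange_one_eq_nil (by omega)]

theorem generate_file_urls_changed : Claim_changed_generate_file_urls := by
  unfold Claim_changed_generate_file_urls
  refine ⟨by decide, by decide, ?_, ?_, by decide⟩
  · show generate_file_urls "u/" 1 (-1) = [("-15955Z.json.gz", "u/-15955Z.json.gz")]
    unfold generate_file_urls
    rw [pvALoop_eq "u/" 1 1 [] (-1) (by simp)]
    rw [show ((-1 : Int) + ((1 : Nat) : Int)) = (-1) + 1 from by norm_num]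
    rw [show PySem.List.pyRange (-1) (-1 + 1) 1 = [(-1)] from PySem.List.pyRange_one_singleton (-1)]
    decide
  · show generate_file_urls_alt "u/" 1 (-1) = [("000000Z.json.gz", "u/000000Z.json.gz")]
    rw [alt_eq]
    rw [show (max 0 (-1 : Int)) = 0 from by norm_num,
        show (min (17280 : Int) (0 + max 0 1)) = 1 from by norm_num]
    rw [show PySem.List.pyRange 0 1 1 = [0] from by decide]
    decide
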